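-- pv_equiv track=rewrite | github.com/jcab07/moveoutside | app.py | modules_to_csv
-- ===== SOURCE A (Python) =====
-- MODULES = [
--     {"id": "realtime", "label": "Control Panel (Tiempo real)"},
--     {"id": "facturacion_patio", "label": "Facturación Patio ECI → Meribia"},
--     {"id": "flota", "label": "Inventario Flota (Listín + Maestro)"},
--     {"id": "personal", "label": "Personal (Conductores / Operativos)"},
--     # =========================
--     # ✅ NUEVOS (NO TOCAN módulos existentes)
--     # =========================
--     {"id": "rutas", "label": "Rutas (ECI + otros)"},
--     {"id": "planificacion", "label": "Planificación (borradores / plantillas)"},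
--     {"id": "clientes", "label": "Clientes (fichas + contactos)"},
--     {"id": "proveedores_fichas", "label": "Proveedores (fichas + contactos)"},
--     {"id": "vehiculos", "label": "Vehículos (docs, ITV, tacógrafo, ATP...)"},
-- ]
--
-- def modules_to_csv(mods: list):
--     mods = [m.strip() for m in (mods or []) if m and m.strip()]
--     valid = {m["id"] for m in MODULES}
--     mods = [m for m in mods if m in valid]
--     out = []
--     seen = set()
--     for m in mods:
--         if m not in seen:
--             out.append(m)
--             seen.add(m)
--     return ",".join(out)
-- ===== SOURCE B (Python) =====
-- VALID_IDS = frozenset({"realtime", "facturacion_patio", "flota", "personal",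
--                        "rutas", "planificacion", "clientes", "proveedores_fichas",
--                        "vehiculos"})
--
-- def modules_to_csv(mods: list):
--     # one cleaning pass: validity of the stripped id subsumes A's truthiness checks
--     cleaned = [m.strip() for m in (mods or []) if m.strip() in VALID_IDS]
--
--     # dedup by filter-out recursion: keep the head, drop its duplicates, recurse.
--     # depth is bounded by the number of distinct valid ids (9), so recursion is safe.
--     def dedup(xs):
--         if not xs:
--             return []
--         s = xs[0]
--         return [s] + dedup([y for y in xs[1:] if y != s])
--
--     return ",".join(dedup(cleaned))
-- ===== Notes on version B (the rewrite author's own statement) =====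
-- stated objective: alternative
-- what changed: A strips/filters/validates in staged comprehensions and dedups with a seen-set loop; B uses one cleaning comprehension (validity of the stripped id subsumes the truthiness checks) and dedups by filter-out recursion (keep the head, recursively dedup the tail with duplicates of the head removed), with no seen set or membership test against the output.
import Mathlib
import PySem

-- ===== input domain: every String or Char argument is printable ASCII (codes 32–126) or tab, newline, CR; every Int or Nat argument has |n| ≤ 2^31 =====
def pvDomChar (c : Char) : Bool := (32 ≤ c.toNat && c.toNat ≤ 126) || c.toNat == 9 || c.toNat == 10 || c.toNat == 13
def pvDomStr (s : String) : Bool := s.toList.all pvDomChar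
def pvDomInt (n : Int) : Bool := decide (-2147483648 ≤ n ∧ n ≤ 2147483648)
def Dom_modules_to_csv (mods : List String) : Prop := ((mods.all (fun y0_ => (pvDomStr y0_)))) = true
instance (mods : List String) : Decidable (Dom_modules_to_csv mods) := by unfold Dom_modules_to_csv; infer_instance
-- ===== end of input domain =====

-- B replaces A's staged comprehensions + seen-set dedup loop by one cleaning pass and a
-- filter-out recursion for dedup; equivalence of return values is proved below.

-- ===== PORT A =====
-- module-level constant MODULES (list of dicts); labels kept verbatim
def pvMODULES : List (PySem.Dict String String) :=
  [ PySem.Dict.ofList [("id", "realtime"), ("label", "Control Panel (Tiempo real)")]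
  , PySem.Dict.ofList [("id", "facturacion_patio"), ("label", "Facturación Patio ECI → Meribia")]
  , PySem.Dict.ofList [("id", "flota"), ("label", "Inventario Flota (Listín + Maestro)")]
  , PySem.Dict.ofList [("id", "personal"), ("label", "Personal (Conductores / Operativos)")]
  , PySem.Dict.ofList [("id", "rutas"), ("label", "Rutas (ECI + otros)")]
  , PySem.Dict.ofList [("id", "planificacion"), ("label", "Planificación (borradores / plantillas)")]
  , PySem.Dict.ofList [("id", "clientes"), ("label", "Clientes (fichas + contactos)")]
  , PySem.Dict.ofList [("id", "proveedores_fichas"), ("label", "Proveedores (fichas + contactos)")]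
  , PySem.Dict.ofList [("id", "vehiculos"), ("label", "Vehículos (docs, ITV, tacógrafo, ATP...)")] ]

def modules_to_csv (mods : List String) : String :=
  -- mods = [m.strip() for m in (mods or []) if m and m.strip()]
  let mods1 := (mods.filter (fun m => !(m == "") && !(PySem.Str.strip m == ""))).map PySem.Str.strip
  -- valid = {m["id"] for m in MODULES}   (every dict has the key "id"; getD "" is exact here)
  let valid : PySem.Set String := PySem.Set.ofList (pvMODULES.map (fun d => PySem.Dict.getD d "id" ""))
  -- mods = [m for m in mods if m in valid]
  let mods2 := mods1.filter (fun m => PySem.Set.contains valid m)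
  -- out = []; seen = set(); for m in mods: if m not in seen: out.append(m); seen.add(m)
  let p := mods2.foldl
    (fun (p : List String × PySem.Set String) m =>
      if !(PySem.Set.contains p.2 m) then (p.1 ++ [m], PySem.Set.add p.2 m) else p)
    ([], PySem.Set.empty)
  PySem.Str.join "," p.1

-- ===== PORT B =====
def pvVALID_IDS : List String :=
  ["realtime", "facturacion_patio", "flota", "personal",
   "rutas", "planificacion", "clientes", "proveedores_fichas", "vehiculos"]

-- def dedup(xs): if not xs: return []; s = xs[0]; return [s] + dedup([y for y in xs[1:] if y != s])
def pvDedup : List String → List String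
  | [] => []
  | s :: xs => s :: pvDedup (xs.filter (fun y => y != s))
  termination_by xs => xs.length
  decreasing_by
    simpa using Nat.lt_succ_of_le (List.length_filter_le _ _)

def modules_to_csv_alt (mods : List String) : String :=
  -- cleaned = [m.strip() for m in (mods or []) if m.strip() in VALID_IDS]
  let cleaned := (mods.filter (fun m => pvVALID_IDS.contains (PySem.Str.strip m))).map PySem.Str.strip
  PySem.Str.join "," (pvDedup cleaned)

-- ===== PRECONDITION & SPEC =====
def Spec_modules_to_csv (mods : List String) (out : String) : Prop := out = modules_to_csv_alt mods
instance (mods : List String) (out : String) : Decidable (Spec_modules_to_csv mods out) := by unfold Spec_modules_to_csv; infer_instance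

-- ===== CLAIM (what is proved, stated in full; the proofs are below) =====
def Claim_equal_modules_to_csv : Prop := ∀ (mods : List String), Dom_modules_to_csv mods → Spec_modules_to_csv mods (modules_to_csv mods)

-- ===== LEMMAS AND PROOFS =====

-- A's dedup loop keeps out and seen equal as lists, so it collapses to a fold on out alone
theorem pv_pair_fold (l : List String) (out : List String) :
    l.foldl
      (fun (p : List String × PySem.Set String) m =>
        if !(PySem.Set.contains p.2 m) then (p.1 ++ [m], PySem.Set.add p.2 m) else p)
      (out, out)
    = (l.foldl (fun out m => if !(out.contains m) then out ++ [m] else out) out,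
       l.foldl (fun out m => if !(out.contains m) then out ++ [m] else out) out) := by
  induction l generalizing out with
  | nil => rfl
  | cons m l ih =>
      simp only [List.foldl_cons]
      by_cases h : m ∈ out
      · simpa [PySem.Set.contains, PySem.Set.add, h] using ih out
      · simpa [PySem.Set.contains, PySem.Set.add, h] using ih (out ++ [m])

-- filtering by "not in out ++ [m]" = filtering by "not in out" then by "≠ m"
theorem pv_filter_aux (l out : List String) (m : String) :
    l.filter (fun y => !((out ++ [m]).contains y))
    = (l.filter (fun y => !(out.contains y))).filter (fun y => y != m) := by
  induction l with
  | nil => rfl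
  | cons a l ih =>
      by_cases h1 : a ∈ out
      · simpa [h1] using ih
      · by_cases h2 : a = m
        · simpa [h1, h2] using ih
        · simpa [h1, h2] using ih

-- A's seen-set fold computes B's filter-out recursion
theorem pv_foldl_dedup (l : List String) (out : List String) :
    l.foldl (fun out m => if !(out.contains m) then out ++ [m] else out) out
    = out ++ pvDedup (l.filter (fun y => !(out.contains y))) := by
  induction l generalizing out with
  | nil => simp [pvDedup]
  | cons m l ih =>
      by_cases h : m ∈ out
      · simpa [h] using ih out
      · simp only [List.foldl_cons]
        rw [show (if (!(List.contains out m)) = true then out ++ [m] else out) = out ++ [m] by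
              simp [h]]
        rw [ih (out ++ [m]), pv_filter_aux,
            List.filter_cons_of_pos (by simp [h])]
        simp [pvDedup]

-- A's three cleaning passes equal B's single one (valid ids are nonempty, and strip "" = "")
theorem pv_clean (mods : List String) :
    (((mods.filter (fun m => !(m == "") && !(PySem.Str.strip m == ""))).map PySem.Str.strip).filter
        (fun m => decide (m ∈ pvVALID_IDS)))
    = (mods.filter (fun m => decide (PySem.Str.strip m ∈ pvVALID_IDS))).map PySem.Str.strip := by
  have hvnil : ("" : String) ∉ pvVALID_IDS := by decide
  induction mods with
  | nil => rfl
  | cons m mods ih =>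
      by_cases hv : PySem.Str.strip m ∈ pvVALID_IDS
      · have hs : ¬ (PySem.Str.strip m = "") := fun h => hvnil (h ▸ hv)
        have hm : ¬ (m = "") := fun h => hs (by simp [h]; decide)
        rw [List.filter_cons_of_pos (by simp [hm, hs]), List.map_cons,
            List.filter_cons_of_pos (by simp [hv]),
            List.filter_cons_of_pos (by simp [hv]), List.map_cons, ih]
      · by_cases hm : m = ""
        · subst hm
          rw [List.filter_cons_of_neg (by decide),
              List.filter_cons_of_neg (by decide), ih]
        · by_cases hs : PySem.Str.strip m = ""
          · rw [List.filter_cons_of_neg (by simp [hs]),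
                List.filter_cons_of_neg (by simp; intro hc; exact hv hc), ih]
          · rw [List.filter_cons_of_pos (by simp [hm, hs]), List.map_cons,
                List.filter_cons_of_neg (by simp [hv]),
                List.filter_cons_of_neg (by simp [hv]), ih]

-- ===== VERDICT (by name: the statement is the Claim_ definition above) =====
theorem modules_to_csv_spec : Claim_equal_modules_to_csv := by
  intro mods _
  show modules_to_csv mods = modules_to_csv_alt mods
  unfold modules_to_csv modules_to_csv_alt
  have hvalid : PySem.Set.ofList (pvMODULES.map (fun d => PySem.Dict.getD d "id" "")) = pvVALID_IDS := by
    decide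
  rw [hvalid]
  have hempty : (PySem.Set.empty : PySem.Set String) = ([] : List String) := rfl
  rw [hempty]
  simp only [pv_pair_fold, pv_foldl_dedup]
  simp only [PySem.Set.contains, List.contains_eq_mem, List.nil_append,
    List.mem_nil_iff, decide_false, Bool.not_false, List.filter_true]
  rw [pv_clean]
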